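-- pv_equiv track=rewrite | github.com/janinadiers/ba-petrinet-recognizer | evaluators/recognizer.py | get_amount_correctly_recognized_shapes
-- ===== SOURCE A (Python) =====
-- from collections import Counter
--
-- def dict_to_hashable(d):
--     # Converts each dictionary to a hashable tuple.
--     # Sort lists that are values of the dictionary to handle unordered comparisons.
--     return tuple((key, tuple(sorted(value)) if isinstance(value, list) else value)
--                  for key, value in sorted(d.items()))
--
-- def get_amount_correctly_recognized_shapes(recognized_shapes: list[dict], expected_shapes: list[dict]) -> int:
--     # Convert lists of dictionaries to hashable tuples using the helper function.
--     rec_shapes_tuples = [dict_to_hashable(shape) for shape in recognized_shapes]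
--     exp_shapes_tuples = [dict_to_hashable(shape) for shape in expected_shapes]
--
--     # Create Counters for both lists to handle duplicate shapes with counts.
--     rec_shapes_counter = Counter(rec_shapes_tuples)
--     exp_shapes_counter = Counter(exp_shapes_tuples)
--
--     # Intersection of counters to get the minimum count of identical items.
--     common_shapes = rec_shapes_counter & exp_shapes_counter
--     total_recognized = sum(common_shapes.values())
--
--     return total_recognized
-- ===== SOURCE B (Python) =====
-- from collections import Counter
--
-- def dict_to_hashable(d):
--     # Converts each dictionary to a hashable tuple.
--     # Sort lists that are values of the dictionary to handle unordered comparisons.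
--     return tuple((key, tuple(sorted(value)) if isinstance(value, list) else value)
--                  for key, value in sorted(d.items()))
--
-- def get_amount_correctly_recognized_shapes(recognized_shapes: list[dict], expected_shapes: list[dict]) -> int:
--     # One multiset of the recognized shapes, consumed during a single pass
--     # over the expected shapes.
--     pool = Counter(dict_to_hashable(shape) for shape in recognized_shapes)
--     total = 0
--     for shape in expected_shapes:
--         t = dict_to_hashable(shape)
--         if pool[t] > 0:
--             total += 1
--             pool[t] -= 1
--     return total
-- ===== Notes on version B (the rewrite author's own statement) =====
-- stated objective: alternative
-- what changed: Instead of building two Counters and summing the values of their '&' intersection, B builds one multiset of the recognized shapes and consumes it greedily during a single pass over the expected shapes, counting each expected shape that still has a positive count.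
import Mathlib
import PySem

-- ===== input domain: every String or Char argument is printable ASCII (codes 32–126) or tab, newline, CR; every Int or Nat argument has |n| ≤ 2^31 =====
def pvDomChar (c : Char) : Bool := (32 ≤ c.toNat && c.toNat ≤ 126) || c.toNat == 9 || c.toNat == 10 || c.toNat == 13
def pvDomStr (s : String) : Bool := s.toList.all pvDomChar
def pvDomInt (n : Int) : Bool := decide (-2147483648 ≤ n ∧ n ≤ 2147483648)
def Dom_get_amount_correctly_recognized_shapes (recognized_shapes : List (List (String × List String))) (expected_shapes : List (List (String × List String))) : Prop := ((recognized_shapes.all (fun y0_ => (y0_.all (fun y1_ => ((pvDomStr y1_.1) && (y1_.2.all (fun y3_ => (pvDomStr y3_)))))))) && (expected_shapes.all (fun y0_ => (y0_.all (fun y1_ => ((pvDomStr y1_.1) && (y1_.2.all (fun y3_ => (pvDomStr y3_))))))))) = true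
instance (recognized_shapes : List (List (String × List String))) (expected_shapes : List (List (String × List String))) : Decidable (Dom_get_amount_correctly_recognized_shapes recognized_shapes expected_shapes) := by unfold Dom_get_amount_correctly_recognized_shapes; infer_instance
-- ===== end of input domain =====

-- B replaces A's two-Counter '&' intersection by one multiset of recognized shapes,
-- consumed greedily in a single pass over the expected shapes (alternative decomposition, same cost).


-- ===== PORT A =====
-- dict_to_hashable: sorted(d.items()) sorts by key (dict keys are distinct, so the
-- value component of the tuple comparison is never reached), each list value sorted.
def dict_to_hashable (d : List (String × List String)) : List (String × List String) :=
  (PySem.List.sorted d (fun p => p.1) false).map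
    (fun p => (p.1, PySem.List.sorted p.2 (fun x => x) false))

-- Counter & Counter (Python's Counter.__and__): keys of the left counter in order,
-- value = min of the two counts, kept only when positive.
def pvCounterAnd (c1 c2 : PySem.Dict (List (String × List String)) Int) :
    PySem.Dict (List (String × List String)) Int :=
  PySem.Dict.mk (c1.items.filterMap (fun kv =>
    let m := min kv.2 (c2.getD kv.1 0)
    if 0 < m then some (kv.1, m) else none))

def get_amount_correctly_recognized_shapes (recognized_shapes : List (List (String × List String))) (expected_shapes : List (List (String × List String))) : Int :=
  let rec_shapes_tuples := recognized_shapes.map dict_to_hashable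
  let exp_shapes_tuples := expected_shapes.map dict_to_hashable
  let rec_shapes_counter := PySem.Dict.counter rec_shapes_tuples
  let exp_shapes_counter := PySem.Dict.counter exp_shapes_tuples
  let common_shapes := pvCounterAnd rec_shapes_counter exp_shapes_counter
  common_shapes.values.sum

-- ===== PORT B =====
def get_amount_correctly_recognized_shapes_alt (recognized_shapes : List (List (String × List String))) (expected_shapes : List (List (String × List String))) : Int :=
  let pool := PySem.Dict.counter (recognized_shapes.map dict_to_hashable)
  (expected_shapes.foldl (fun st shape =>
      let t := dict_to_hashable shape
      if 0 < st.1.getD t 0 then (st.1.modify t 0 (· - 1), st.2 + 1) else st)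
    (pool, (0 : Int))).2

-- ===== PRECONDITION & SPEC =====
def Spec_get_amount_correctly_recognized_shapes (recognized_shapes : List (List (String × List String))) (expected_shapes : List (List (String × List String))) (out : Int) : Prop := out = get_amount_correctly_recognized_shapes_alt recognized_shapes expected_shapes
instance (recognized_shapes : List (List (String × List String))) (expected_shapes : List (List (String × List String))) (out : Int) : Decidable (Spec_get_amount_correctly_recognized_shapes recognized_shapes expected_shapes out) := by unfold Spec_get_amount_correctly_recognized_shapes; infer_instance

-- ===== CLAIM (what is proved, stated in full; the proofs are below) =====
def Claim_equal_get_amount_correctly_recognized_shapes : Prop := ∀ (recognized_shapes : List (List (String × List String))) (expected_shapes : List (List (String × List String))), Dom_get_amount_correctly_recognized_shapes recognized_shapes expected_shapes → Spec_get_amount_correctly_recognized_shapes recognized_shapes expected_shapes (get_amount_correctly_recognized_shapes recognized_shapes expected_shapes)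

-- ===== LEMMAS AND PROOFS =====

-- Sum of values kept by the positive-min filter = sum of the (nonnegative) mins.
theorem pv_sum_filterMap_ite {κ : Type} (l : List κ) (m : κ → Int) :
    ((l.filterMap (fun k => if 0 < m k then some (k, m k) else none)).map (·.2)).sum
      = (l.map (fun k => if 0 < m k then m k else 0)).sum := by
  induction l with
  | nil => simp
  | cons x xs ih => by_cases h : 0 < m x <;> simp [h, ih]

theorem pv_toFinset_ofList {κ : Type} [BEq κ] [LawfulBEq κ] [DecidableEq κ] (l : List κ) :
    (PySem.Set.ofList l).toFinset = l.toFinset := by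
  ext k; simp [List.mem_toFinset, PySem.Set.mem_ofList]

-- A's value as a Finset sum of per-key minima over the recognized keys.
theorem pvA_eq_sum (recT expT : List (List (String × List String))) :
    (pvCounterAnd (PySem.Dict.counter recT) (PySem.Dict.counter expT)).values.sum
      = ∑ k ∈ recT.toFinset, min (recT.count k : Int) (expT.count k : Int) := by
  have hvals : (pvCounterAnd (PySem.Dict.counter recT) (PySem.Dict.counter expT)).values
      = ((PySem.Dict.counter recT).items.filterMap (fun kv =>
          if 0 < min kv.2 ((PySem.Dict.counter expT).getD kv.1 0) then
            some (kv.1, min kv.2 ((PySem.Dict.counter expT).getD kv.1 0)) else none)).map (·.2) := rfl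
  rw [hvals, PySem.Dict.items_counter, List.filterMap_map]
  have hmin : ∀ k : List (String × List String),
      min ((recT.count k : Int)) ((PySem.Dict.counter expT).getD k 0)
        = min (recT.count k : Int) (expT.count k : Int) := by
    intro k; rw [PySem.Dict.getD_counter]
  have := pv_sum_filterMap_ite (PySem.Set.ofList recT)
      (fun k => min (recT.count k : Int) (expT.count k : Int))
  have hcomp : (Function.comp (fun kv : (List (String × List String)) × Int =>
        if 0 < min kv.2 ((PySem.Dict.counter expT).getD kv.1 0) then
          some (kv.1, min kv.2 ((PySem.Dict.counter expT).getD kv.1 0)) else none)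
        (fun k => (k, (recT.count k : Int))))
      = (fun k => if 0 < min (recT.count k : Int) (expT.count k : Int) then
          some (k, min (recT.count k : Int) (expT.count k : Int)) else none) := by
    funext k; simp [Function.comp]
  rw [hcomp, this]
  have hpos : (fun k => if 0 < min (recT.count k : Int) (expT.count k : Int) then
      min (recT.count k : Int) (expT.count k : Int) else 0)
      = fun k => min (recT.count k : Int) (expT.count k : Int) := by
    funext k
    by_cases h : 0 < min (recT.count k : Int) (expT.count k : Int)
    · simp [h]
    · have h1 : (0:Int) ≤ (recT.count k : Int) := Int.natCast_nonneg _
      have h2 : (0:Int) ≤ (expT.count k : Int) := Int.natCast_nonneg _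
      simp only [h, if_false]
      omega
  rw [hpos, ← List.sum_toFinset _ (PySem.Set.nodup_ofList recT), pv_toFinset_ofList recT]

-- Summing the per-key minima over either side's key set gives the same value.
theorem pv_sum_min_swap (xs ys : List (List (String × List String))) :
    ∑ k ∈ xs.toFinset, min (xs.count k : Int) (ys.count k : Int)
      = ∑ k ∈ ys.toFinset, min (xs.count k : Int) (ys.count k : Int) := by
  have hx : ∑ k ∈ xs.toFinset, min (xs.count k : Int) (ys.count k : Int)
      = ∑ k ∈ xs.toFinset ∪ ys.toFinset, min (xs.count k : Int) (ys.count k : Int) := by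
    refine Finset.sum_subset Finset.subset_union_left ?_
    intro k _ hk
    have : xs.count k = 0 := by
      simpa [List.count_eq_zero] using (by simpa [List.mem_toFinset] using hk : k ∉ xs)
    simp [this]
  have hy : ∑ k ∈ ys.toFinset, min (xs.count k : Int) (ys.count k : Int)
      = ∑ k ∈ xs.toFinset ∪ ys.toFinset, min (xs.count k : Int) (ys.count k : Int) := by
    refine Finset.sum_subset Finset.subset_union_right ?_
    intro k _ hk
    have : ys.count k = 0 := by
      simpa [List.count_eq_zero] using (by simpa [List.mem_toFinset] using hk : k ∉ ys)
    simp [this]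
  rw [hx, hy]

-- B's greedy consumption loop computes the per-key minima against any nonnegative pool.
theorem pv_greedy (exp : List (List (String × List String)))
    (p : PySem.Dict (List (String × List String)) Int) (t : Int)
    (hp : ∀ k, 0 ≤ p.getD k 0) :
    (exp.foldl (fun st x => if 0 < st.1.getD x 0 then (st.1.modify x 0 (· - 1), st.2 + 1) else st)
        (p, t)).2
      = t + ∑ k ∈ exp.toFinset, min (p.getD k 0) (exp.count k : Int) := by
  induction exp generalizing p t with
  | nil => simp
  | cons x rest ih =>
    simp only [List.foldl_cons, List.toFinset_cons]
    by_cases h : 0 < p.getD x 0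
    · rw [if_pos h]
      rw [ih (p.modify x 0 (· - 1)) (t + 1) ?_]
      · by_cases hx : x ∈ rest.toFinset
        · rw [Finset.insert_eq_self.mpr hx]
          rw [← Finset.add_sum_erase _ _ hx, ← Finset.add_sum_erase _ _ hx]
          have hrest : ∀ k ∈ rest.toFinset.erase x,
              min ((p.modify x 0 (· - 1)).getD k 0) (rest.count k : Int)
                = min (p.getD k 0) (((x :: rest).count k : Int)) := by
            intro k hk
            have hne : k ≠ x := (Finset.mem_erase.mp hk).1
            rw [PySem.Dict.getD_modify, if_neg hne, List.count_cons, if_neg (by simpa using hne.symm)]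
            simp
          rw [Finset.sum_congr rfl hrest]
          have : min ((p.modify x 0 (· - 1)).getD x 0) (rest.count x : Int) + 1
              = min (p.getD x 0) (((x :: rest).count x : Int)) := by
            rw [PySem.Dict.getD_modify_self, List.count_cons_self]
            push_cast; omega
          omega
        · rw [Finset.sum_insert hx]
          have hcnt : rest.count x = 0 := List.count_eq_zero.mpr (by simpa [List.mem_toFinset] using hx)
          have hrest : ∀ k ∈ rest.toFinset,
              min ((p.modify x 0 (· - 1)).getD k 0) (rest.count k : Int)
                = min (p.getD k 0) (((x :: rest).count k : Int)) := by
            intro k hk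
            have hne : k ≠ x := by rintro rfl; exact hx hk
            rw [PySem.Dict.getD_modify, if_neg hne, List.count_cons, if_neg (by simpa using hne.symm)]
            simp
          rw [Finset.sum_congr rfl hrest]
          have : min (p.getD x 0) (((x :: rest).count x : Int)) = 1 := by
            rw [List.count_cons_self, hcnt]; push_cast; omega
          omega
      · intro k
        rw [PySem.Dict.getD_modify]
        split
        · omega
        · exact hp k
    · rw [if_neg h]
      rw [ih p t hp]
      have hzero : p.getD x 0 = 0 := le_antisymm (by omega) (hp x)
      by_cases hx : x ∈ rest.toFinset
      · rw [Finset.insert_eq_self.mpr hx]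
        refine congrArg (t + ·) (Finset.sum_congr rfl ?_)
        intro k hk
        by_cases hne : k = x
        · rw [hne, hzero]
          have h1 : (0:Int) ≤ (rest.count x : Int) := Int.natCast_nonneg _
          have h2 : (0:Int) ≤ ((x :: rest).count x : Int) := Int.natCast_nonneg _
          omega
        · rw [List.count_cons, if_neg (by simpa using (Ne.symm hne))]
          simp
      · rw [Finset.sum_insert hx]
        have hterm : min (p.getD x 0) (((x :: rest).count x : Int)) = 0 := by
          rw [hzero]
          have : (0:Int) ≤ ((x :: rest).count x : Int) := Int.natCast_nonneg _
          omega
        have hrest : ∀ k ∈ rest.toFinset,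
            min (p.getD k 0) (rest.count k : Int) = min (p.getD k 0) (((x :: rest).count k : Int)) := by
          intro k hk
          have hne : k ≠ x := by rintro rfl; exact hx hk
          rw [List.count_cons, if_neg (by simpa using hne.symm)]
          simp
        rw [Finset.sum_congr rfl hrest]
        omega

-- B's loop over expected_shapes, with the hashing fused in, is the plain loop over the hashed list.
theorem pv_foldl_hash (exp : List (List (String × List String)))
    (st : PySem.Dict (List (String × List String)) Int × Int) :
    (exp.foldl (fun st shape =>
        if 0 < st.1.getD (dict_to_hashable shape) 0 then
          (st.1.modify (dict_to_hashable shape) 0 (· - 1), st.2 + 1) else st) st)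
      = ((exp.map dict_to_hashable).foldl (fun st x =>
          if 0 < st.1.getD x 0 then (st.1.modify x 0 (· - 1), st.2 + 1) else st) st) := by
  induction exp generalizing st with
  | nil => rfl
  | cons x rest ih => simp only [List.foldl_cons, List.map_cons]; exact ih _

-- ===== VERDICT (by name: the statement is the Claim_ definition above) =====
theorem get_amount_correctly_recognized_shapes_spec : Claim_equal_get_amount_correctly_recognized_shapes := by
  intro recognized_shapes expected_shapes _
  unfold Spec_get_amount_correctly_recognized_shapes
  unfold get_amount_correctly_recognized_shapes get_amount_correctly_recognized_shapes_alt
  simp only []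
  rw [pv_foldl_hash]
  rw [pv_greedy _ _ _ (fun k => by rw [PySem.Dict.getD_counter]; exact Int.natCast_nonneg _)]
  rw [pvA_eq_sum, pv_sum_min_swap, zero_add]
  exact Finset.sum_congr rfl (fun k _ => by rw [PySem.Dict.getD_counter])
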